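-- pv_equiv track=rewrite | github.com/JustDoYoung/Coding-Test | 프로그래머스/1/135808. 과일 장수/과일 장수.py | solution
-- ===== SOURCE A (Python) =====
-- def solution(k, m, score):
--     answer = 0
--
--     score = sorted(score, reverse=True)
--     box_count = len(score) // m
--
--     for index in range(1, box_count + 1):
--         box_price = score[index * m - 1] * m
--         answer += box_price
--
--     return answer
-- ===== SOURCE B (Python) =====
-- def solution(k, m, score):
--     box_count = len(score) // m
--     if box_count <= 0:
--         return 0
--     limit = box_count * m
--     freq = {}
--     for v in score:
--         freq[v] = freq.get(v, 0) + 1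
--     answer = 0
--     p = 0
--     for v in sorted(freq, reverse=True):
--         if p >= limit:
--             break
--         hi = min(p + freq[v], limit)
--         answer += v * m * (hi // m - p // m)
--         p += freq[v]
--     return answer
-- ===== Notes on version B (the rewrite author's own statement) =====
-- stated objective: alternative
-- what changed: B replaces A's full descending sort plus per-box stride indexing by a one-pass frequency dictionary whose distinct values (sorted descending) are walked once, counting via floor division how many box minima fall inside each value's run and breaking out once all boxes are filled.
import Mathlib
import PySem

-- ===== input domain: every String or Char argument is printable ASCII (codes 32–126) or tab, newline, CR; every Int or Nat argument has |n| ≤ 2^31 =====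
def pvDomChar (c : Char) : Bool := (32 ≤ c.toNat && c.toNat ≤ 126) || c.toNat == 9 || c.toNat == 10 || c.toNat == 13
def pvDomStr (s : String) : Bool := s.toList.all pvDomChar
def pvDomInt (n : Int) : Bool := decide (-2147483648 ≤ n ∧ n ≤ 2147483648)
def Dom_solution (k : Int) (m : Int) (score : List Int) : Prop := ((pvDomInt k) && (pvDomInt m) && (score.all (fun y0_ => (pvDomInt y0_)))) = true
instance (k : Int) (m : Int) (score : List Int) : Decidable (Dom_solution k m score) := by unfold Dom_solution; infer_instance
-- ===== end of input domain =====

-- B builds a frequency dictionary in one pass and aggregates over the distinct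
-- values (sorted descending), counting the box minima that land in each value's
-- run by floor division, instead of A's full sort plus per-box stride indexing;
-- objective: alternative algorithm.

-- ===== PORT A =====
def solution (k : Int) (m : Int) (score : List Int) : Int :=
  let answer : Int := 0
  let score2 := PySem.List.sorted score (fun x => x) true
  let box_count := PySem.Int.floordiv ((score2.length : Nat) : Int) m
  (PySem.List.pyRange 1 (box_count + 1) 1).foldl
    (fun answer index =>
      let box_price := PySem.List.pyGetD score2 (index * m - 1) 0 * m
      answer + box_price) answer

-- ===== PORT B =====
-- the 'for v in sorted(freq, reverse=True): … break …' loop of Source B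
def solGo (limit m : Int) (freq : PySem.Dict Int Int) : List Int → Int → Int → Int
  | [], answer, _ => answer
  | v :: rest, answer, p =>
    if limit ≤ p then answer
    else
      solGo limit m freq rest
        (answer + v * m *
          (PySem.Int.floordiv (min (p + freq.getD v 0) limit) m - PySem.Int.floordiv p m))
        (p + freq.getD v 0)

def solution_alt (k : Int) (m : Int) (score : List Int) : Int :=
  let box_count := PySem.Int.floordiv ((score.length : Nat) : Int) m
  if box_count ≤ 0 then 0
  else
    let limit := box_count * m
    let freq := score.foldl (fun d v => d.insert v (d.getD v 0 + 1)) PySem.Dict.empty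
    solGo limit m freq (PySem.List.sorted freq.keys (fun x => x) true) 0 0

-- ===== PRECONDITION & SPEC =====
-- Pre_ excludes only m = 0, on which Python A raises ZeroDivisionError (len(score) // m).
def Pre_solution (k : Int) (m : Int) (score : List Int) : Prop := m ≠ 0
instance (k : Int) (m : Int) (score : List Int) : Decidable (Pre_solution k m score) := by unfold Pre_solution; infer_instance
def pvWitness_solution : Int × Int × List Int := (7, 2, [1, 2, 3])

def Spec_solution (k : Int) (m : Int) (score : List Int) (out : Int) : Prop := out = solution_alt k m score
instance (k : Int) (m : Int) (score : List Int) (out : Int) : Decidable (Spec_solution k m score out) := by unfold Spec_solution; infer_instance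

-- ===== CLAIM (what is proved, stated in full; the proofs are below) =====
def Claim_equal_solution : Prop := ∀ (k : Int) (m : Int) (score : List Int), Dom_solution k m score → Pre_solution k m score → Spec_solution k m score (solution k m score)

-- ===== LEMMAS AND PROOFS =====

-- sum of l[p+t] over positions t with p+t < limitN and (p+t+1) % mN = 0 (the box minima)
def minSum (mN limitN : ℕ) : ℕ → List Int → Int
  | _, [] => 0
  | p, x :: L => (if p < limitN ∧ (p + 1) % mN = 0 then x else 0) + minSum mN limitN (p + 1) L

lemma minSum_zero_of_le (mN limitN : ℕ) (p : ℕ) (L : List Int) (h : limitN ≤ p) :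
    minSum mN limitN p L = 0 := by
  induction L generalizing p with
  | nil => rfl
  | cons x t ih =>
      rw [minSum, if_neg (by omega), ih (p + 1) (by omega), add_zero]

lemma minSum_append (mN limitN : ℕ) (A B : List Int) (p : ℕ) :
    minSum mN limitN p (A ++ B) = minSum mN limitN p A + minSum mN limitN (p + A.length) B := by
  induction A generalizing p with
  | nil => simp [minSum]
  | cons x t ih =>
      have hlen : p + 1 + t.length = p + (x :: t).length := by
        simp [List.length_cons]; omega
      rw [List.cons_append, minSum, minSum, ih (p + 1), hlen, add_assoc]

lemma minSum_replicate (mN limitN : ℕ) (hm : 1 ≤ mN) (c : ℕ) (v : Int) (p : ℕ) :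
    minSum mN limitN p (List.replicate c v)
      = v * (((min (p + c) limitN / mN : ℕ) : Int) - ((min p limitN / mN : ℕ) : Int)) := by
  induction c generalizing p with
  | zero => simp [minSum]
  | succ c ih =>
      rw [List.replicate_succ, minSum, ih (p + 1)]
      have hmin : min (p + 1 + c) limitN = min (p + (c + 1)) limitN := by omega
      have hstep : ((min (p + 1) limitN / mN : ℕ) : Int) - ((min p limitN / mN : ℕ) : Int)
          = if p < limitN ∧ (p + 1) % mN = 0 then 1 else 0 := by
        by_cases hp : p < limitN
        · have h1 : min (p + 1) limitN = p + 1 := by omega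
          have h2 : min p limitN = p := by omega
          rw [h1, h2, Nat.succ_div]
          by_cases hd : mN ∣ p + 1
          · rw [if_pos hd, if_pos ⟨hp, Nat.dvd_iff_mod_eq_zero.mp hd⟩]
            push_cast; ring
          · rw [if_neg hd, if_neg (by
              rintro ⟨-, hmod⟩
              exact hd (Nat.dvd_iff_mod_eq_zero.mpr hmod))]
            push_cast; ring
        · have h1 : min (p + 1) limitN = limitN := by omega
          have h2 : min p limitN = limitN := by omega
          rw [h1, h2, if_neg (by omega)]
          ring
      rw [hmin]
      by_cases hcond : p < limitN ∧ (p + 1) % mN = 0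
      · rw [if_pos hcond]
        rw [if_pos hcond] at hstep
        linear_combination (-v) * hstep
      · rw [if_neg hcond]
        rw [if_neg hcond] at hstep
        linear_combination (-v) * hstep

-- a sorted-descending list whose values are all ≤ v starts with all its copies of v
lemma take_count_replicate (L : List Int) (v : Int)
    (hs : L.Pairwise (fun a b => b ≤ a)) (hmax : ∀ x ∈ L, x ≤ v) :
    L.take (L.count v) = List.replicate (L.count v) v := by
  induction L with
  | nil => rfl
  | cons x t ih =>
      rcases List.pairwise_cons.mp hs with ⟨hx, ht⟩
      by_cases hxv : x = v
      · subst hxv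
        rw [List.count_cons_self, List.take_succ_cons, List.replicate_succ,
          ih ht (fun y hy => hmax y (List.mem_cons_of_mem _ hy))]
      · have hx_lt : x < v := lt_of_le_of_ne (hmax x List.mem_cons_self) hxv
        have hvt : v ∉ t := fun hv => absurd (hx v hv) (by omega)
        have hc0 : (x :: t).count v = 0 := by
          rw [List.count_cons, List.count_eq_zero.mpr hvt,
            if_neg (by simp; omega)]
        simp [hc0]

lemma minSum_eq_sum_range (mN limitN : ℕ) (L : List Int) (p : ℕ) :
    minSum mN limitN p L
      = ∑ t ∈ Finset.range L.length,
          if p + t < limitN ∧ (p + t + 1) % mN = 0 then L.getD t 0 else 0 := by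
  induction L generalizing p with
  | nil => rfl
  | cons x t ih =>
      rw [List.length_cons, Finset.sum_range_succ', minSum, ih (p + 1)]
      have hhead : (if p < limitN ∧ (p + 1) % mN = 0 then x else 0)
          = if p + 0 < limitN ∧ (p + 0 + 1) % mN = 0 then (x :: t).getD 0 0 else 0 := by
        simp
      have htail : (∑ i ∈ Finset.range t.length,
            if p + 1 + i < limitN ∧ (p + 1 + i + 1) % mN = 0 then t.getD i 0 else 0)
          = ∑ i ∈ Finset.range t.length,
            if p + (i + 1) < limitN ∧ (p + (i + 1) + 1) % mN = 0
              then (x :: t).getD (i + 1) 0 else 0 := by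
        apply Finset.sum_congr rfl
        intro i _
        have h1 : p + 1 + i = p + (i + 1) := by omega
        rw [List.getD_cons_succ, h1]
      rw [hhead, htail, add_comm]

lemma reindex_sum (mN bn n : ℕ) (hm : 1 ≤ mN) (hn : bn * mN ≤ n) (g : ℕ → Int) :
    (∑ t ∈ Finset.range n, if t < bn * mN ∧ (t + 1) % mN = 0 then g t else 0)
      = ∑ j ∈ Finset.range bn, g ((1 + j) * mN - 1) := by
  rw [← Finset.sum_filter]
  refine Finset.sum_nbij' (fun t => (t + 1) / mN - 1) (fun j => (1 + j) * mN - 1)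
    ?_ ?_ ?_ ?_ ?_
  · intro t ht
    simp only [Finset.mem_filter, Finset.mem_range] at ht ⊢
    obtain ⟨-, hlt, hmod⟩ := ht
    obtain ⟨q, hq⟩ := Nat.dvd_iff_mod_eq_zero.mpr hmod
    have hq1 : 1 ≤ q := by
      rcases Nat.eq_zero_or_pos q with h | h
      · subst h; simp at hq
      · exact h
    have hle : mN * q ≤ mN * bn := by
      calc mN * q = t + 1 := hq.symm
        _ ≤ bn * mN := by omega
        _ = mN * bn := Nat.mul_comm _ _
    have hqbn : q ≤ bn := Nat.le_of_mul_le_mul_left hle (by omega)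
    rw [hq, Nat.mul_div_cancel_left _ (by omega : 0 < mN)]
    omega
  · intro j hj
    simp only [Finset.mem_range] at hj
    simp only [Finset.mem_filter, Finset.mem_range]
    have h1 : (1 + j) * mN ≤ bn * mN := Nat.mul_le_mul_right _ (by omega)
    have h2 : 1 ≤ (1 + j) * mN := by nlinarith
    refine ⟨by omega, by omega, ?_⟩
    have h3 : (1 + j) * mN - 1 + 1 = (1 + j) * mN := by omega
    rw [h3, Nat.mul_mod_left]
  · intro t ht
    dsimp only
    simp only [Finset.mem_filter, Finset.mem_range] at ht
    obtain ⟨-, hlt, hmod⟩ := ht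
    obtain ⟨q, hq⟩ := Nat.dvd_iff_mod_eq_zero.mpr hmod
    have hq1 : 1 ≤ q := by
      rcases Nat.eq_zero_or_pos q with h | h
      · subst h; simp at hq
      · exact h
    rw [hq, Nat.mul_div_cancel_left _ (by omega : 0 < mN)]
    have h3 : (1 + (q - 1)) * mN = mN * q := by
      rw [Nat.mul_comm]; congr 1; omega
    rw [h3]
    omega
  · intro j hj
    dsimp only
    simp only [Finset.mem_range] at hj
    have h2 : 1 ≤ (1 + j) * mN := by nlinarith
    have h3 : (1 + j) * mN - 1 + 1 = (1 + j) * mN := by omega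
    rw [h3, Nat.mul_div_cancel _ (by omega : 0 < mN)]
    omega
  · intro t ht
    dsimp only
    simp only [Finset.mem_filter, Finset.mem_range] at ht
    obtain ⟨-, hlt, hmod⟩ := ht
    obtain ⟨q, hq⟩ := Nat.dvd_iff_mod_eq_zero.mpr hmod
    have hq1 : 1 ≤ q := by
      rcases Nat.eq_zero_or_pos q with h | h
      · subst h; simp at hq
      · exact h
    rw [hq, Nat.mul_div_cancel_left _ (by omega : 0 < mN)]
    have h3 : (1 + (q - 1)) * mN = mN * q := by
      rw [Nat.mul_comm]; congr 1; omega
    congr 1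
    omega

-- evaluation of B's key loop against minSum over the remaining run-decomposed suffix
lemma go_eval (mN limitN : ℕ) (hm : 1 ≤ mN) (freq : PySem.Dict Int Int) (cnt : Int → ℕ)
    (keys : List Int) :
    ∀ (L : List Int) (p : ℕ) (answer : Int),
    keys.Pairwise (fun a b => b < a) →
    L.Pairwise (fun a b : Int => b ≤ a) →
    (∀ v : Int, L.count v = if v ∈ keys then cnt v else 0) →
    (∀ v ∈ keys, 0 < cnt v) →
    (∀ v ∈ keys, freq.getD v 0 = ((cnt v : ℕ) : Int)) →
    solGo ((limitN : ℕ) : Int) ((mN : ℕ) : Int) freq keys answer ((p : ℕ) : Int)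
      = answer + ((mN : ℕ) : Int) * minSum mN limitN p L := by
  induction keys with
  | nil =>
      intro L p answer _ _ hcount _ _
      have hL : L = [] := by
        apply List.eq_nil_iff_forall_not_mem.mpr
        intro x hx
        have := hcount x
        rw [if_neg (List.not_mem_nil)] at this
        exact absurd (List.count_pos_iff.mpr hx) (by omega)
      subst hL
      rw [solGo, minSum]
      ring
  | cons v rest ih =>
      intro L p answer hkeys hsorted hcount hpos hfreq
      rcases List.pairwise_cons.mp hkeys with ⟨hvrest, hrest⟩
      have hvnotrest : v ∉ rest := fun hv => absurd (hvrest v hv) (lt_irrefl v)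
      have hcntv : L.count v = cnt v := by
        have := hcount v; rwa [if_pos List.mem_cons_self] at this
      have hmax : ∀ x ∈ L, x ≤ v := by
        intro x hx
        have hxk : x ∈ v :: rest := by
          by_contra hxk
          have := hcount x
          rw [if_neg hxk] at this
          exact absurd (List.count_pos_iff.mpr hx) (by omega)
        rcases List.mem_cons.mp hxk with h | h
        · omega
        · exact le_of_lt (hvrest x h)
      set c := cnt v with hc
      have hcle : c ≤ L.length := hcntv ▸ List.count_le_length
      have hdecomp : L = List.replicate c v ++ L.drop c := by
        conv_lhs => rw [← List.take_append_drop c L]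
        rw [← hcntv, take_count_replicate L v hsorted hmax, hcntv]
      set L' := L.drop c with hL'
      have hsorted' : L'.Pairwise (fun a b : Int => b ≤ a) :=
        List.Pairwise.sublist (List.drop_sublist c L) hsorted
      have hcount' : ∀ w : Int, L'.count w = if w ∈ rest then cnt w else 0 := by
        intro w
        have hsplit : L.count w = (List.replicate c v).count w + L'.count w := by
          conv_lhs => rw [hdecomp]
          exact List.count_append
        rw [List.count_replicate] at hsplit
        have hLw := hcount w
        simp only [List.mem_cons] at hLw
        by_cases hwv : w = v
        · subst hwv
          simp only [beq_self_eq_true, if_true] at hsplit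
          rw [if_neg hvnotrest]
          omega
        · rw [if_neg (by simp; omega)] at hsplit
          by_cases hwr : w ∈ rest
          · rw [if_pos hwr]
            rw [if_pos (Or.inr hwr)] at hLw
            omega
          · rw [if_neg hwr]
            rw [if_neg (by simp [hwv, hwr])] at hLw
            omega
      rw [solGo]
      by_cases hbreak : ((limitN : ℕ) : Int) ≤ ((p : ℕ) : Int)
      · rw [if_pos hbreak, minSum_zero_of_le mN limitN p L (by exact_mod_cast hbreak)]
        ring
      · rw [if_neg hbreak]
        have hplt : p < limitN := by exact_mod_cast not_le.mp hbreak
        have hgetD : freq.getD v 0 = ((c : ℕ) : Int) := hfreq v List.mem_cons_self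
        have hhi : min (((p : ℕ) : Int) + freq.getD v 0) ((limitN : ℕ) : Int)
            = ((min (p + c) limitN : ℕ) : Int) := by
          rw [hgetD]; push_cast; ring_nf
        have hfd1 : PySem.Int.floordiv ((min (p + c) limitN : ℕ) : Int) ((mN : ℕ) : Int)
            = ((min (p + c) limitN / mN : ℕ) : Int) := PySem.Int.floordiv_natCast _ _
        have hfd2 : PySem.Int.floordiv ((p : ℕ) : Int) ((mN : ℕ) : Int)
            = ((p / mN : ℕ) : Int) := PySem.Int.floordiv_natCast _ _
        have hpcast : ((p : ℕ) : Int) + freq.getD v 0 = (((p + c : ℕ) : ℕ) : Int) := by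
          rw [hgetD]; push_cast; ring
        rw [hhi, hfd1, hfd2, hpcast,
          ih L' (p + c) _ hrest hsorted' hcount'
            (fun w hw => hpos w (List.mem_cons_of_mem _ hw))
            (fun w hw => hfreq w (List.mem_cons_of_mem _ hw))]
        conv_rhs => rw [hdecomp, minSum_append, minSum_replicate mN limitN hm c v p,
          List.length_replicate]
        have hminp : min p limitN = p := by omega
        rw [hminp]
        ring

lemma list_sum_range_int (f : ℕ → ℤ) (b : ℕ) :
    ((List.range b).map f).sum = ∑ i ∈ Finset.range b, f i := rfl

-- evaluation of port A for positive m
lemma A_eval (k m : Int) (hm : 0 < m) (score : List Int) :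
    solution k m score
      = ((List.range (score.length / m.toNat)).map
          (fun j => (PySem.List.sorted score (fun x => x) true).getD
              ((1 + j) * m.toNat - 1) 0 * m)).sum := by
  unfold solution
  dsimp only
  set desc := PySem.List.sorted score (fun x => x) true with hdesc
  have hlen : desc.length = score.length := PySem.List.length_sorted score (fun x => x) true
  set n := score.length with hn
  set mN := m.toNat with hmN
  have hcast : ((mN : Nat) : Int) = m := Int.toNat_of_nonneg hm.le
  have hmN1 : 1 ≤ mN := by omega
  have hfd : PySem.Int.floordiv ((desc.length : Nat) : Int) m = ((n / mN : Nat) : Int) := by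
    rw [hlen, ← hcast, PySem.Int.floordiv_natCast]
  rw [hfd, PySem.List.pyRange_one,
    show ((n / mN : Nat) : Int) + 1 - 1 = ((n / mN : Nat) : Int) from by ring,
    Int.toNat_natCast, PySem.List.foldl_add, zero_add, List.map_map]
  refine congrArg List.sum (List.map_congr_left ?_)
  intro j hj
  have hj' : j < n / mN := List.mem_range.mp hj
  have hub : (1 + j) * mN ≤ n :=
    le_trans (Nat.mul_le_mul_right mN (by omega)) (Nat.div_mul_le_self n mN)
  have hX1 : 1 ≤ (1 + j) * mN := Nat.one_le_iff_ne_zero.mpr (by positivity)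
  show PySem.List.pyGetD desc ((1 + (j : Int)) * m - 1) 0 * m = _
  have hge : (0 : Int) ≤ (1 + (j : Int)) * m - 1 := by
    nlinarith [Int.natCast_nonneg j]
  rw [PySem.List.pyGetD_of_nonneg _ _ hge]
  have hidxN : ((1 + (j : Int)) * m - 1).toNat = (1 + j) * mN - 1 := by
    rw [← hcast]
    have hpc : (((1 + j) * mN : Nat) : Int) = (1 + (j : Int)) * ((mN : Nat) : Int) := by
      push_cast; ring
    rw [← hpc]
    set X := (1 + j) * mN with hX
    omega
  rw [hidxN]

lemma A_nonpos (k m : Int) (score : List Int)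
    (hbc : PySem.Int.floordiv ((score.length : Nat) : Int) m ≤ 0) :
    solution k m score = 0 := by
  unfold solution
  dsimp only
  rw [PySem.List.length_sorted]
  rw [PySem.List.pyRange_one_eq_nil (by omega)]
  rfl

-- ===== VERDICT (by name: the statement is the Claim_ definition above) =====
theorem solution_spec : Claim_equal_solution := by
  intro k m score _ hpre
  show solution k m score = solution_alt k m score
  unfold solution_alt
  dsimp only
  by_cases hbc : PySem.Int.floordiv ((score.length : Nat) : Int) m ≤ 0
  · rw [if_pos hbc, A_nonpos k m score hbc]
  · rw [if_neg hbc]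
    rw [not_le] at hbc
    -- m must be positive
    have hm : 0 < m := by
      rcases lt_trichotomy m 0 with hneg | hz | hpos
      · exfalso
        have h1 := PySem.Int.floordiv_mul_add_mod ((score.length : Nat) : Int) m
        have h2 := (PySem.Int.mod_neg_bounds (a := ((score.length : Nat) : Int)) hneg).2
        nlinarith [Int.natCast_nonneg score.length, hbc]
      · exact absurd hz hpre
      · exact hpos
    set n := score.length with hn
    set mN := m.toNat with hmN
    have hcast : ((mN : Nat) : Int) = m := Int.toNat_of_nonneg hm.le
    have hmN1 : 1 ≤ mN := by omega
    set bn := n / mN with hbn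
    have hfd : PySem.Int.floordiv ((n : Nat) : Int) m = ((bn : Nat) : Int) := by
      rw [← hcast, PySem.Int.floordiv_natCast]
    set limitN := bn * mN with hlimitN
    have hlimit : PySem.Int.floordiv ((n : Nat) : Int) m * m = ((limitN : Nat) : Int) := by
      rw [hfd, ← hcast, hlimitN]; push_cast; ring
    have hlimle : limitN ≤ n := Nat.div_mul_le_self n mN
    rw [PySem.Dict.foldl_insert_getD_add_one_eq_counter, PySem.Dict.keys_counter]
    set desc := PySem.List.sorted score (fun x => x) true with hdesc
    set keys := PySem.List.sorted (PySem.Set.ofList score) (fun x => x) true with hkeys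
    have hlen : desc.length = n := PySem.List.length_sorted score (fun x => x) true
    -- hypotheses of go_eval
    have hkperm : keys.Perm (PySem.Set.ofList score) :=
      PySem.List.sorted_perm _ _ _
    have hknodup : keys.Nodup := hkperm.symm.nodup (PySem.Set.nodup_ofList score)
    have hkmem : ∀ v : Int, v ∈ keys ↔ v ∈ score := by
      intro v
      rw [hkperm.mem_iff, PySem.Set.mem_ofList]
    have hkpair : keys.Pairwise (fun a b : Int => b < a) := by
      have h1 : keys.Pairwise (fun a b : Int => b ≤ a) :=
        PySem.List.sorted_pairwise_rev _ _
      exact (h1.and hknodup).imp (fun h => lt_of_le_of_ne h.1 (Ne.symm h.2))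
    have hdpair : desc.Pairwise (fun a b : Int => b ≤ a) :=
      PySem.List.sorted_pairwise_rev _ _
    have hdperm : desc.Perm score := PySem.List.sorted_perm _ _ _
    have hcount : ∀ v : Int, desc.count v = if v ∈ keys then score.count v else 0 := by
      intro v
      rw [hdperm.count_eq]
      by_cases hv : v ∈ keys
      · rw [if_pos hv]
      · rw [if_neg hv, List.count_eq_zero.mpr (fun h => hv ((hkmem v).mpr h))]
    have hpos : ∀ v ∈ keys, 0 < score.count v := by
      intro v hv
      exact List.count_pos_iff.mpr ((hkmem v).mp hv)
    have hfreq : ∀ v ∈ keys, (PySem.Dict.counter score).getD v 0 = ((score.count v : Nat) : Int) :=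
      fun v _ => PySem.Dict.getD_counter score v
    have hB := go_eval mN limitN hmN1 (PySem.Dict.counter score) (fun v => score.count v)
      keys desc 0 0 hkpair hdpair hcount hpos hfreq
    rw [Nat.cast_zero, hcast] at hB
    rw [hlimit, hB, zero_add]
    -- A side
    rw [A_eval k m hm score, ← hn, ← hmN, ← hbn, ← hdesc]
    have hAsum : ((List.range bn).map
        (fun j => desc.getD ((1 + j) * mN - 1) 0 * m)).sum
        = (∑ j ∈ Finset.range bn, desc.getD ((1 + j) * mN - 1) 0) * m := by
      rw [list_sum_range_int, ← Finset.sum_mul]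
    rw [hAsum, minSum_eq_sum_range, hlen]
    have hcond : ∀ t ∈ Finset.range n,
        (if 0 + t < limitN ∧ (0 + t + 1) % mN = 0 then desc.getD t 0 else 0)
          = (if t < limitN ∧ (t + 1) % mN = 0 then desc.getD t 0 else 0) := by
      intro t _
      simp
    rw [Finset.sum_congr rfl hcond, hlimitN,
      reindex_sum mN bn n hmN1 (hlimitN ▸ hlimle) (fun t => desc.getD t 0)]
    ring
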